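-- pv_equiv track=rewrite | github.com/lixiang2017/leetcode | leetcode-cn/1332.0_Remove_Palindromic_Subsequences.py | removePalindromeSub
-- ===== SOURCE A (Python) =====
-- def removePalindromeSub(s: str) -> int:
--     def isPalindromic(s):
--         l, r = 0, len(s) - 1
--         while l <= r and s[l] == s[r]:
--             l += 1
--             r -= 1
--
--         return l > r
--
--     return 1 if isPalindromic(s) else 2
-- ===== SOURCE B (Python) =====
-- def removePalindromeSub(s: str) -> int:
--     return 1 if s == s[::-1] else 2
-- ===== Notes on version B (the rewrite author's own statement) =====
-- stated objective: idiomatic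
-- what changed: Replaces the hand-written two-pointer while-loop palindrome check (early exit on mismatch) with a whole-string reversal-and-comparison (s == s[::-1]).
import Mathlib
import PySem

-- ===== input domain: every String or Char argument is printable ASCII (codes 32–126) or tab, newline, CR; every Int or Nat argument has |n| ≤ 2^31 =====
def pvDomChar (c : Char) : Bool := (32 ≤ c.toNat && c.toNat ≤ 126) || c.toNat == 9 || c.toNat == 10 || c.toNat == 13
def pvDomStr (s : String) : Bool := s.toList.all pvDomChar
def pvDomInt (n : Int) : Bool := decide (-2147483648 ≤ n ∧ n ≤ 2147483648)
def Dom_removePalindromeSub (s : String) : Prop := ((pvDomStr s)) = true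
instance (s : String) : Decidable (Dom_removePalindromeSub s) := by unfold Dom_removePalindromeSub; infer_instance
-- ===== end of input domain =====

-- B replaces A's two-pointer while-loop palindrome test with an idiomatic
-- reversal-and-comparison (s == s[::-1]); same O(n) cost.


-- ===== PORT A =====
-- the 'while l <= r and s[l] == s[r]' loop of isPalindromic; indices l,r are
-- always in range when read (0 ≤ l ≤ r < len), so pyGet? option equality is
-- exact for the Python character comparison
def pvLoopA (cs : List Char) (l r : Int) : Int × Int :=
  if l ≤ r ∧ PySem.List.pyGet? cs l = PySem.List.pyGet? cs r then
    pvLoopA cs (l + 1) (r - 1)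
  else (l, r)
termination_by (r - l + 1).toNat
decreasing_by omega

def removePalindromeSub (s : String) : Int :=
  let cs := s.toList
  let lr := pvLoopA cs 0 ((cs.length : Int) - 1)
  if lr.1 > lr.2 then 1 else 2

-- ===== PORT B =====
-- s[::-1] is list reversal (PySem.List.slice?_none_none_neg_one)
def removePalindromeSub_alt (s : String) : Int :=
  if s.toList = s.toList.reverse then 1 else 2

-- ===== PRECONDITION & SPEC =====
def Spec_removePalindromeSub (s : String) (out : Int) : Prop := out = removePalindromeSub_alt s
instance (s : String) (out : Int) : Decidable (Spec_removePalindromeSub s out) := by unfold Spec_removePalindromeSub; infer_instance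

-- ===== CLAIM (what is proved, stated in full; the proofs are below) =====
def Claim_equal_removePalindromeSub : Prop := ∀ (s : String), Dom_removePalindromeSub s → Spec_removePalindromeSub s (removePalindromeSub s)

-- ===== LEMMAS AND PROOFS =====

-- the loop stops with l > r iff every position in [l, r] matches its mirror (sum l + r)
theorem pvLoopA_iff (cs : List Char) (l r : Int) (hl : 0 ≤ l) (hr : r < (cs.length : Int)) :
    ((pvLoopA cs l r).1 > (pvLoopA cs l r).2) ↔
    (∀ i : Int, l ≤ i → i ≤ r → PySem.List.pyGet? cs i = PySem.List.pyGet? cs (l + r - i)) := by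
  fun_induction pvLoopA cs l r with
  | case1 l r h ih =>
    rw [ih (by omega) (by omega)]
    constructor
    · intro hin i hli hir
      rcases eq_or_lt_of_le hli with hEq | hlt
      · subst hEq
        simpa using h.2
      rcases eq_or_lt_of_le hir with hEq | hrt
      · subst hEq
        simpa using h.2.symm
      · have := hin i (by omega) (by omega)
        convert this using 2
        omega
    · intro hall i hli hir
      have := hall i (by omega) (by omega)
      convert this using 2
      omega
  | case2 l r h =>
    simp only
    by_cases hlr : l ≤ r
    · have hne : ¬ PySem.List.pyGet? cs l = PySem.List.pyGet? cs r := by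
        intro he; exact h ⟨hlr, he⟩
      constructor
      · intro hgt; omega
      · intro hall
        exfalso
        have := hall l le_rfl hlr
        have heq : l + r - l = r := by omega
        rw [heq] at this
        exact hne this
    · constructor
      · intro _ i hli hir; omega
      · intro _; omega

theorem removePalindromeSub_spec : Claim_equal_removePalindromeSub := by
  intro s _
  unfold Spec_removePalindromeSub removePalindromeSub removePalindromeSub_alt
  set cs := s.toList with hcs
  have key := pvLoopA_iff cs 0 ((cs.length : Int) - 1) le_rfl (by omega)
  by_cases hp : cs = cs.reverse
  · have hall : ∀ i : Int, 0 ≤ i → i ≤ (cs.length : Int) - 1 →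
        PySem.List.pyGet? cs i = PySem.List.pyGet? cs (0 + ((cs.length : Int) - 1) - i) := by
      intro i h0 h1
      have hi : i.toNat < cs.length := by omega
      have hj : (0 + ((cs.length : Int) - 1) - i).toNat < cs.length := by omega
      rw [PySem.List.pyGet?_of_nonneg (xs := cs) h0,
          PySem.List.pyGet?_of_nonneg (xs := cs) (show (0:Int) ≤ 0 + ((cs.length : Int) - 1) - i by omega)]
      have hrev : cs[i.toNat]? = cs.reverse[i.toNat]? := by rw [← hp]
      rw [hrev, List.getElem?_reverse hi]
      have : cs.length - 1 - i.toNat = (0 + ((cs.length : Int) - 1) - i).toNat := by omega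
      rw [this]
    rw [if_pos (key.mpr hall), if_pos hp]
  · have hnall : ¬ (∀ i : Int, 0 ≤ i → i ≤ (cs.length : Int) - 1 →
        PySem.List.pyGet? cs i = PySem.List.pyGet? cs (0 + ((cs.length : Int) - 1) - i)) := by
      intro hall
      apply hp
      apply List.ext_getElem (by simp)
      intro n hn hn'
      have := hall (n : Int) (by omega) (by omega)
      rw [PySem.List.pyGet?_of_nonneg (xs := cs) (by omega),
          PySem.List.pyGet?_of_nonneg (xs := cs) (by omega)] at this
      have hj : (0 + ((cs.length : Int) - 1) - (n : Int)).toNat = cs.length - 1 - n := by omega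
      rw [hj] at this
      simp only [Int.toNat_natCast] at this
      have h1 : n < cs.length := by omega
      have h2 : cs.length - 1 - n < cs.length := by omega
      rw [List.getElem?_eq_getElem h1, List.getElem?_eq_getElem h2] at this
      rw [List.getElem_reverse]
      exact Option.some.inj this
    have : ¬ ((pvLoopA cs 0 ((cs.length : Int) - 1)).1 > (pvLoopA cs 0 ((cs.length : Int) - 1)).2) := by
      rw [key]; exact hnall
    rw [if_neg this, if_neg hp]
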